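-- pv_equiv track=rewrite | github.com/thealper2/codewars-solutions | 7-kyu/simple_fun_168_rsa_super_key_generator.py | super_key_generator
-- ===== SOURCE A (Python) =====
-- def super_key_generator(n):
--     max_num = -1
--     for five in range(0, n + 1, 3):
--         three = n - five
--         if three >= 0 and three % 5 == 0:
--             candidate = '5' * five + '3' * three
--             if candidate:
--                 candidate_num = int(candidate)
--                 if candidate_num > max_num:
--                     max_num = candidate_num
--
--     return str(max_num) if max_num != -1 else "-1"
-- ===== SOURCE B (Python) =====
-- def super_key_generator(n):
--     # The candidates are the strings '5'*five + '3'*(n-five) with five % 3 == 0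
--     # and (n - five) % 5 == 0; all have length n, so the one with the most fives
--     # is the largest.  Any two valid 'five' values are congruent mod 15, so the
--     # largest one (if any) lies within the top 15 values: scan r = n - five
--     # upward from 0 and build the single winning string directly.
--     if n <= 0:
--         return "-1"
--     for r in range(15):
--         five = n - r
--         if five < 0:
--             break
--         if five % 3 == 0 and r % 5 == 0:
--             return "5" * five + "3" * r
--     return "-1"
-- ===== Notes on version B (the rewrite author's own statement) =====
-- stated objective: faster
-- what changed: A scans every multiple of 3 up to n, building each candidate string and int-converting it for a running max; B uses that all valid five-counts are congruent mod 15, scans only the top 15 residues and builds the single winning string directly, with no integer conversion.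
import Mathlib
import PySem

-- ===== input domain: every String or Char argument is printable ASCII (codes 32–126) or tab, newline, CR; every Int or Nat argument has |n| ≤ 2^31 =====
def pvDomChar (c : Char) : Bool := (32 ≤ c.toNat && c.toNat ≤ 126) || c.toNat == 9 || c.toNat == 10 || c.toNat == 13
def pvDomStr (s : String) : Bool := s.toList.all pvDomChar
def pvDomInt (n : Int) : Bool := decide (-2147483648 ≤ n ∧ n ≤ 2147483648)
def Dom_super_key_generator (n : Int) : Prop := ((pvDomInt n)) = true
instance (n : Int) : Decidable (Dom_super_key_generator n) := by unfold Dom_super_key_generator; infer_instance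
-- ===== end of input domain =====

-- B replaces A's ascending scan over all multiples of 3 (each building a candidate
-- string and int-converting it for a running max) by a 15-residue scan from the top
-- that builds the single winning string directly.

-- ===== PORT A =====
-- int(candidate): hand-ported as the decimal digit fold; exact at this call site
-- because candidate is always a nonempty list of the digit characters '5'/'3'
-- (PySem.Int.ofStr? returns some of the same value on such strings, but its digit
-- accumulator is private and unusable in proofs).
def pyIntOfDigits (cs : List Char) : Int :=
  cs.foldl (fun a c => 10 * a + ((c.toNat : Int) - 48)) 0

-- strings handled as their character lists; '5' * five is PySem.List.pyRepeat ['5'] five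
def super_key_generator (n : Int) : String :=
  let max_num := (PySem.List.pyRange 0 (n + 1) 3).foldl (fun max_num five =>
    let three := n - five
    if three ≥ 0 ∧ PySem.Int.mod three 5 = 0 then
      let candidate := PySem.List.pyRepeat ['5'] five ++ PySem.List.pyRepeat ['3'] three
      if candidate ≠ [] then
        let candidate_num := pyIntOfDigits candidate
        if candidate_num > max_num then candidate_num else max_num
      else max_num
    else max_num) (-1)
  if max_num ≠ -1 then PySem.Int.toStr max_num else "-1"

-- ===== PORT B =====
-- the for-loop with its early returns ('break' falls through to the final return "-1")
def altGo (n : Int) : List Int → String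
  | [] => "-1"
  | r :: rs =>
    let five := n - r
    if five < 0 then "-1"
    else if PySem.Int.mod five 3 = 0 ∧ PySem.Int.mod r 5 = 0 then
      String.ofList (PySem.List.pyRepeat ['5'] five ++ PySem.List.pyRepeat ['3'] r)
    else altGo n rs

def super_key_generator_alt (n : Int) : String :=
  if n ≤ 0 then "-1" else altGo n (PySem.List.pyRange 0 15 1)

-- ===== PRECONDITION & SPEC =====
def Spec_super_key_generator (n : Int) (out : String) : Prop := out = super_key_generator_alt n
instance (n : Int) (out : String) : Decidable (Spec_super_key_generator n out) := by unfold Spec_super_key_generator; infer_instance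

-- ===== CLAIM (what is proved, stated in full; the proofs are below) =====
def Claim_equal_super_key_generator : Prop := ∀ (n : Int), Dom_super_key_generator n → Spec_super_key_generator n (super_key_generator n)

-- ===== LEMMAS AND PROOFS =====

-- the candidate string with f fives and t threes, as characters
def cand (f t : Nat) : List Char := List.replicate f '5' ++ List.replicate t '3'

-- its numeric value, defined by peeling the LAST digit (the shape Nat.toDigitsCore consumes)
def valN : Nat → Nat → Nat
  | 0, _ => 0
  | n+1, 0 => 10 * valN n 0 + 5
  | n+1, t+1 => 10 * valN n t + 3

theorem nine_valN : ∀ n t, t ≤ n → 9 * valN n t + 2 * 10 ^ t + 3 = 5 * 10 ^ n := by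
  intro n
  induction n with
  | zero => intro t ht; interval_cases t; simp [valN]
  | succ n ih =>
    intro t ht
    cases t with
    | zero => have := ih 0 (Nat.zero_le n); simp [valN, pow_succ] at *; omega
    | succ t =>
      have := ih t (by omega)
      simp [valN, pow_succ] at *; omega

theorem fold_digits (f t : Nat) : ∀ (a : Int),
    9 * (cand f t).foldl (fun a c => 10 * a + ((c.toNat : Int) - 48)) a
      = 9 * a * 10 ^ (f + t) + 5 * 10 ^ (f + t) - 2 * 10 ^ t - 3 := by
  induction f with
  | zero =>
    induction t with
    | zero => intro a; simp [cand]; ring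
    | succ t iht =>
      intro a
      simp only [cand, List.replicate_zero, List.replicate_succ, List.nil_append, List.foldl_cons, Nat.zero_add] at *
      have h := iht (10 * a + (('3'.toNat : Int) - 48))
      rw [h]
      have h3 : (('3'.toNat : Int) - 48) = 3 := by decide
      rw [h3, pow_succ]; ring
  | succ f ihf =>
    intro a
    simp only [cand, List.replicate_succ, List.cons_append, List.foldl_cons] at *
    rw [ihf]
    have h5 : (('5'.toNat : Int) - 48) = 5 := by decide
    rw [h5]
    have : f + 1 + t = (f + t) + 1 := by omega
    rw [this, pow_succ]; ring

theorem nine_pyInt (f t : Nat) :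
    9 * pyIntOfDigits (cand f t) = 5 * 10 ^ (f + t) - 2 * 10 ^ t - 3 := by
  have := fold_digits f t 0
  simpa [pyIntOfDigits] using this

theorem pyInt_cand_eq_valN (f t : Nat) : pyIntOfDigits (cand f t) = (valN (f + t) t : Int) := by
  have h1 := nine_pyInt f t
  have h2 := nine_valN (f + t) t (by omega)
  have h3 : (9 : Int) * (valN (f + t) t : Int) + 2 * 10 ^ t + 3 = 5 * 10 ^ (f + t) := by
    exact_mod_cast congrArg (Nat.cast : Nat → Int) h2
  push_cast at h3
  omega

theorem pyInt_cand_nonneg (f t : Nat) : 0 ≤ pyIntOfDigits (cand f t) := by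
  rw [pyInt_cand_eq_valN]; positivity

theorem pyInt_cand_mono {n t t' : Nat} (h : t < t') (h' : t' ≤ n) :
    pyIntOfDigits (cand (n - t') t') < pyIntOfDigits (cand (n - t) t) := by
  have h1 := nine_pyInt (n - t') t'
  have h2 := nine_pyInt (n - t) t
  have e1 : n - t' + t' = n := by omega
  have e2 : n - t + t = n := by omega
  rw [e1] at h1; rw [e2] at h2
  have hp : (10 : Int) ^ t < 10 ^ t' := by
    exact pow_lt_pow_right₀ (by norm_num) h
  omega

theorem valN_pos {n t : Nat} (ht : t ≤ n) (hn : 0 < n) : 0 < valN n t := by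
  have := nine_valN n t ht
  have h1 : 10 ^ t ≤ 10 ^ n := Nat.pow_le_pow_right (by norm_num) ht
  have h2 : 10 ≤ 10 ^ n := by calc (10:Nat) = 10 ^ 1 := by norm_num
                                  _ ≤ 10 ^ n := Nat.pow_le_pow_right (by norm_num) hn
  omega

theorem toDigitsCore_succ (b fuel n : Nat) (ds : List Char) :
    Nat.toDigitsCore b (fuel+1) n ds =
      if n / b = 0 then (n % b).digitChar :: ds
      else Nat.toDigitsCore b fuel (n / b) ((n % b).digitChar :: ds) := by
  simp [Nat.toDigitsCore]

theorem toDigitsCore_valN : ∀ n, ∀ t fuel acc, t ≤ n → 0 < n → n ≤ fuel →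
    Nat.toDigitsCore 10 fuel (valN n t) acc = cand (n - t) t ++ acc := by
  intro n
  induction n with
  | zero => omega
  | succ n ih =>
    intro t fuel acc ht hn hf
    obtain ⟨fuel, rfl⟩ : ∃ f', fuel = f' + 1 := ⟨fuel - 1, by omega⟩
    rw [toDigitsCore_succ]
    rcases Nat.eq_zero_or_pos n with hn0 | hn0
    · subst hn0
      interval_cases t
      · have h5 : valN 1 0 = 5 := rfl
        rw [h5]; norm_num [cand, Nat.digitChar]
      · have h3 : valN 1 1 = 3 := rfl
        rw [h3]; norm_num [cand, Nat.digitChar]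
    · -- n ≥ 1, so valN (n+1) t = 10 * w + d with w = valN n t' > 0
      cases t with
      | zero =>
        have hv : valN (n+1) 0 = 10 * valN n 0 + 5 := rfl
        have hw : 0 < valN n 0 := valN_pos (Nat.zero_le n) hn0
        have hdiv : valN (n+1) 0 / 10 = valN n 0 := by omega
        have hmod : valN (n+1) 0 % 10 = 5 := by omega
        rw [hdiv, hmod, if_neg (by omega)]
        rw [ih 0 fuel _ (Nat.zero_le n) hn0 (by omega)]
        show cand (n-0) 0 ++ (Nat.digitChar 5 :: acc) = cand (n+1-0) 0 ++ acc
        simp [cand, Nat.digitChar, List.replicate_succ']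
      | succ t =>
        have hv : valN (n+1) (t+1) = 10 * valN n t + 3 := rfl
        have hw : 0 < valN n t := valN_pos (by omega) hn0
        have hdiv : valN (n+1) (t+1) / 10 = valN n t := by omega
        have hmod : valN (n+1) (t+1) % 10 = 3 := by omega
        rw [hdiv, hmod, if_neg (by omega)]
        rw [ih t fuel _ (by omega) hn0 (by omega)]
        show cand (n-t) t ++ (Nat.digitChar 3 :: acc) = cand (n+1-(t+1)) (t+1) ++ acc
        have : n + 1 - (t+1) = n - t := by omega
        rw [this]
        simp [cand, Nat.digitChar, List.replicate_succ']

theorem ten_pow_big (n : Nat) : 3 * n + 1 ≤ 10 ^ n := by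
  induction n with
  | zero => simp
  | succ n ih => rw [pow_succ]; omega

theorem valN_ge {n t : Nat} (ht : t ≤ n) : n ≤ valN n t := by
  have h9 := nine_valN n t ht
  have h1 : 10 ^ t ≤ 10 ^ n := Nat.pow_le_pow_right (by norm_num) ht
  have h2 := ten_pow_big n
  omega

theorem toStr_valN {n t : Nat} (ht : t ≤ n) (hn : 0 < n) :
    PySem.Int.toStr ((valN n t : Nat) : Int) = String.ofList (cand (n - t) t) := by
  have h1 : (PySem.Int.toStr ((valN n t : Nat) : Int)).toList = PySem.Int.toChars ((valN n t : Nat) : Int) :=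
    PySem.Int.toList_toStr _
  have h2 : PySem.Int.toChars ((valN n t : Nat) : Int) = Nat.toDigits 10 (valN n t) := by
    simp [PySem.Int.toChars]
  have h3 : Nat.toDigits 10 (valN n t) = cand (n - t) t := by
    have := toDigitsCore_valN n t (valN n t + 1) [] ht hn (by have := valN_ge ht; omega)
    simpa [Nat.toDigits] using this
  have : (PySem.Int.toStr ((valN n t : Nat) : Int)).toList = (String.ofList (cand (n - t) t)).toList := by
    simp [h1, h2, h3]
  exact String.toList_injective this

def stepA (n : Int) (max_num five : Int) : Int :=
  let three := n - five
  if three ≥ 0 ∧ PySem.Int.mod three 5 = 0 then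
    let candidate := PySem.List.pyRepeat ['5'] five ++ PySem.List.pyRepeat ['3'] three
    if candidate ≠ [] then
      let candidate_num := pyIntOfDigits candidate
      if candidate_num > max_num then candidate_num else max_num
    else max_num
  else max_num

-- the value of the candidate with five = 3k

def VI (n : Int) (k : Nat) : Int := pyIntOfDigits (cand (n.toNat - (n.toNat - 3*k)) (n.toNat - 3*k))

theorem VI_nonneg (n : Int) (k : Nat) : 0 ≤ VI n k := pyInt_cand_nonneg _ _

theorem VI_mono {n : Int} {j k : Nat} (hj : j < k) (hk : 3*(k:Int) ≤ n) : VI n j < VI n k := by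
  unfold VI
  exact pyInt_cand_mono (by omega) (by omega)

theorem foldA (n : Int) (hn : 0 < n) : ∀ K : Nat, 3*((K:Int) - 1) ≤ n →
    ((List.range K).foldl (fun (a : Int) (k : Nat) => stepA n a (0 + 3*(k:Int))) (-1) = -1
        ∧ ∀ k < K, ¬((5:Int) ∣ (n - 3*(k:Int)))) ∨
    (∃ k', k' < K ∧ ((5:Int) ∣ (n - 3*(k':Int)))
        ∧ (∀ j, k' < j → j < K → ¬((5:Int) ∣ (n - 3*(j:Int))))
        ∧ (List.range K).foldl (fun (a : Int) (k : Nat) => stepA n a (0 + 3*(k:Int))) (-1) = VI n k') := by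
  intro K
  induction K with
  | zero => intro _; left; constructor; rfl; omega
  | succ K ih =>
    intro hK
    have h3K : 3*(K:Int) ≤ n := by push_cast at hK ⊢; omega
    rw [List.range_succ, List.foldl_append, List.foldl_cons, List.foldl_nil]
    have hstep : ∀ m : Int, -1 ≤ m → stepA n m (0 + 3*(K:Int)) =
        if (5:Int) ∣ (n - 3*(K:Int)) then (if VI n K > m then VI n K else m) else m := by
      intro m hm
      have hge : n - (0 + 3*(K:Int)) ≥ 0 := by omega
      have hcand : PySem.List.pyRepeat ['5'] (0 + 3*(K:Int)) ++ PySem.List.pyRepeat ['3'] (n - (0 + 3*(K:Int)))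
          = cand (n.toNat - (n.toNat - 3*K)) (n.toNat - 3*K) := by
        rw [PySem.List.pyRepeat_singleton, PySem.List.pyRepeat_singleton]
        unfold cand
        congr 2 <;> omega
      have hne : cand (n.toNat - (n.toNat - 3*K)) (n.toNat - 3*K) ≠ [] := by
        unfold cand
        intro h
        have := congrArg List.length h
        simp [List.length_append] at this
        omega
      unfold stepA
      simp only [PySem.Int.mod_eq_zero_iff_dvd, zero_add, VI] at hge hcand ⊢
      rw [hcand]
      by_cases hd : (5:Int) ∣ (n - 3*(K:Int))
      · rw [if_pos ⟨hge, hd⟩, if_pos hne, if_pos hd]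
      · rw [if_neg (fun h => hd h.2), if_neg hd]
    rcases ih (by push_cast at hK ⊢; omega) with ⟨hm, hall⟩ | ⟨k', hk', hdvd, hmax, hm⟩
    · rw [hm, hstep (-1) le_rfl]
      by_cases hd : (5:Int) ∣ (n - 3*(K:Int))
      · right
        refine ⟨K, by omega, hd, by omega, ?_⟩
        rw [if_pos hd, if_pos (by have := VI_nonneg n K; omega)]
      · left
        refine ⟨by rw [if_neg hd], ?_⟩
        intro k hk
        rcases Nat.lt_succ_iff_lt_or_eq.mp hk with h | h
        · exact hall k h
        · subst h; exact hd
    · rw [hm, hstep _ (by have := VI_nonneg n k'; omega)]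
      by_cases hd : (5:Int) ∣ (n - 3*(K:Int))
      · right
        refine ⟨K, by omega, hd, by omega, ?_⟩
        rw [if_pos hd, if_pos (VI_mono hk' h3K)]
      · right
        refine ⟨k', by omega, hdvd, ?_, by rw [if_neg hd]⟩
        intro j hj hjK
        rcases Nat.lt_succ_iff_lt_or_eq.mp hjK with h | h
        · exact hmax j hj h
        · subst h; exact hd

theorem altGo_none (n : Int) : ∀ rs : List Int,
    (∀ r ∈ rs, 0 ≤ n - r → ¬(PySem.Int.mod (n - r) 3 = 0 ∧ PySem.Int.mod r 5 = 0)) →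
    altGo n rs = "-1" := by
  intro rs
  induction rs with
  | nil => intro _; rfl
  | cons r rs ih =>
    intro h
    unfold altGo
    by_cases h5 : n - r < 0
    · rw [if_pos h5]
    · rw [if_neg h5, if_neg (h r (List.mem_cons_self) (by omega))]
      exact ih (fun j hj => h j (List.mem_cons_of_mem r hj))

theorem altGo_hit (n : Int) (r : Int) (rs₂ : List Int)
    (hr : 0 ≤ n - r) (h3 : PySem.Int.mod (n - r) 3 = 0) (h5 : PySem.Int.mod r 5 = 0) :
    ∀ rs₁ : List Int,
    (∀ j ∈ rs₁, 0 ≤ n - j ∧ ¬(PySem.Int.mod (n - j) 3 = 0 ∧ PySem.Int.mod j 5 = 0)) →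
    altGo n (rs₁ ++ r :: rs₂) =
      String.ofList (PySem.List.pyRepeat ['5'] (n - r) ++ PySem.List.pyRepeat ['3'] r) := by
  intro rs₁
  induction rs₁ with
  | nil =>
    intro _
    rw [List.nil_append]
    unfold altGo
    dsimp only
    rw [if_neg (by omega : ¬ n - r < 0), if_pos (⟨h3, h5⟩ : PySem.Int.mod (n - r) 3 = 0 ∧ PySem.Int.mod r 5 = 0)]
  | cons j rs₁ ih =>
    intro h
    obtain ⟨hj0, hjn⟩ := h j (List.mem_cons_self)
    rw [List.cons_append]
    unfold altGo
    dsimp only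
    rw [if_neg (by omega), if_neg hjn]
    exact ih (fun x hx => h x (List.mem_cons_of_mem j hx))

theorem super_key_eq_stepA (n : Int) : super_key_generator n =
    (if (PySem.List.pyRange 0 (n + 1) 3).foldl (stepA n) (-1) ≠ -1
     then PySem.Int.toStr ((PySem.List.pyRange 0 (n + 1) 3).foldl (stepA n) (-1)) else "-1") := rfl

theorem main_eq (n : Int) : super_key_generator n = super_key_generator_alt n := by
  rcases lt_trichotomy n 0 with hneg | rfl | hn
  · rw [super_key_eq_stepA]
    rw [PySem.List.pyRange_of_pos 0 (n+1) (by norm_num),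
        if_neg (show ¬((0:Int) < n + 1) by omega)]
    simp only [List.range_zero, List.map_nil, List.foldl_nil, ne_eq,
      not_true_eq_false, if_false]
    unfold super_key_generator_alt
    rw [if_pos (show n ≤ 0 by omega)]
  · decide
  · -- n > 0
    rw [super_key_eq_stepA]
    rw [PySem.List.pyRange_of_pos 0 (n+1) (by norm_num),
        if_pos (show (0:Int) < n + 1 by omega)]
    rw [List.foldl_map]
    have hK1 : 3*((((n + 1 - 0 + 3 - 1) / 3).toNat :Int) - 1) ≤ n := by omega
    have hiK : ∀ k : Nat, 3*(k:Int) ≤ n → k < ((n + 1 - 0 + 3 - 1) / 3).toNat := by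
      intro k hk; omega
    have hfold := foldA n hn ((n + 1 - 0 + 3 - 1) / 3).toNat hK1
    unfold super_key_generator_alt
    rw [if_neg (show ¬ (n ≤ 0) by omega)]
    rcases hfold with ⟨hm, hnone⟩ | ⟨k', hk'K, hdvd, hmax, hm⟩
    · rw [hm]
      simp only [ne_eq, not_true_eq_false, if_false]
      rw [altGo_none n _ ?_]
      intro r hr hr0 hmods
      obtain ⟨h3, h5⟩ := hmods
      rw [PySem.List.mem_pyRange_one] at hr
      rw [PySem.Int.mod_eq_zero_iff_dvd] at h3 h5
      obtain ⟨c, hc⟩ := h3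
      have hc0 : 0 ≤ c := by omega
      refine hnone c.toNat (hiK c.toNat (by omega)) ?_
      have hcr : n - 3*((c.toNat:Int)) = r := by omega
      rw [hcr]; exact h5
    · have hk3 : 3*((k':Int)) ≤ n := by omega
      have hr0 : (0:Int) ≤ n - 3*(k':Int) := by omega
      have h5r : (5:Int) ∣ (n - 3*(k':Int)) := hdvd
      have hr15 : n - 3*(k':Int) < 15 := by
        by_contra hge
        refine hmax (k' + 5) (by omega) (hiK (k'+5) (by push_cast; omega)) ?_
        have he : n - 3*(((k'+5:Nat)):Int) = (n - 3*(k':Int)) - 15 := by push_cast; omega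
        rw [he]
        omega
      -- evaluate B
      have hsplit : PySem.List.pyRange 0 15 1 =
          PySem.List.pyRange 0 (n - 3*(k':Int)) 1 ++
            ((n - 3*(k':Int)) :: PySem.List.pyRange ((n - 3*(k':Int))+1) 15 1) := by
        have hcons : PySem.List.pyRange (n - 3*(k':Int)) 15 1 =
            (n - 3*(k':Int)) :: PySem.List.pyRange ((n - 3*(k':Int))+1) 15 1 :=
          PySem.List.pyRange_one_cons (show n - 3*(k':Int) < 15 by omega)
        rw [PySem.List.pyRange_one_append 0 (n - 3*(k':Int)) 15 hr0 (by omega), hcons]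
      rw [hsplit, altGo_hit n (n - 3*(k':Int)) _ (by omega)
            (by rw [PySem.Int.mod_eq_zero_iff_dvd]; exact ⟨(k':Int), by omega⟩)
            (by rw [PySem.Int.mod_eq_zero_iff_dvd]; exact h5r) _ ?_]
      · -- A's side
        rw [hm]
        have hVnn := VI_nonneg n k'
        rw [if_pos (show ¬ (VI n k' = -1) by omega)]
        have ht : n.toNat - 3*k' ≤ n.toNat := by omega
        have hVI : VI n k' = ((valN n.toNat (n.toNat - 3*k') : Nat) : Int) := by
          unfold VI
          rw [pyInt_cand_eq_valN]
          congr 2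
          omega
        rw [hVI, toStr_valN ht (by omega)]
        congr 1
        rw [PySem.List.pyRepeat_singleton, PySem.List.pyRepeat_singleton]
        unfold cand
        congr 2 <;> omega
      · -- no earlier r fires
        intro j hj
        rw [PySem.List.mem_pyRange_one] at hj
        refine ⟨by omega, ?_⟩
        intro hmods
        obtain ⟨h3, h5⟩ := hmods
        rw [PySem.Int.mod_eq_zero_iff_dvd] at h3 h5
        obtain ⟨c, hc⟩ := h3
        refine hmax c.toNat (by omega) (hiK c.toNat (by omega)) ?_
        have hcj : n - 3*((c.toNat:Int)) = j := by omega
        rw [hcj]; exact h5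

-- ===== VERDICT (by name: the statement is the Claim_ definition above) =====
theorem super_key_generator_spec : Claim_equal_super_key_generator := by
  intro n _
  exact main_eq n
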